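-- pv_equiv track=rewrite | github.com/curieshicy/My_Utilities_Code | Useful_Code_Snippets/find_index_consecutive_Ds.py | find_index_consecutive_Ds
-- ===== SOURCE A (Python) =====
-- def find_index_consecutive_Ds(s):
--     s += 'Z'
--     res = []
--     start = 0
--     i = 0
--     while i < len(s):
--         if s[i] != 'D':
--             i += 1
--             continue
--
--         if s[i] == 'D':
--             start = i
--             while s[i] == 'D':
--                 i += 1
--
--         res.append((start, i - 1))
--     return res
-- ===== SOURCE B (Python) =====
-- import re
--
-- def find_index_consecutive_Ds(s):
--     return [(m.start(), m.end() - 1) for m in re.finditer('D+', s)]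
-- ===== Notes on version B (the rewrite author's own statement) =====
-- stated objective: idiomatic
-- what changed: Replaces the sentinel-terminated index while-loop with nested run-scanning by a single re.finditer pass over maximal runs of the target character, mapping each match to its (start, end-1) pair; the appended terminator and manual index bookkeeping disappear.
import Mathlib
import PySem

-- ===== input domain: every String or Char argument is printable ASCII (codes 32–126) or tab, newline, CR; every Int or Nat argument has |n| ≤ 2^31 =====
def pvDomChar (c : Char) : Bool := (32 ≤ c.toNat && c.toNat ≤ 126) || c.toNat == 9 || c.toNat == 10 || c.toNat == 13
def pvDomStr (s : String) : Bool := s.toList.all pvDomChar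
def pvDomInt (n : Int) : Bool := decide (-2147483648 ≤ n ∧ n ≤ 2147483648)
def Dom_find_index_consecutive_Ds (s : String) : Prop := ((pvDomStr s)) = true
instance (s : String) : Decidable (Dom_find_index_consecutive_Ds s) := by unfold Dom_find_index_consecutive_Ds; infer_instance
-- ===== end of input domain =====

-- B replaces A's sentinel-terminated while-loop with re.finditer('D+') (ported as a
-- maximal-run scan over the character list); return values proved equal on all strings.

-- ===== PORT A =====
-- inner `while s[i] == 'D': i += 1` of A (bounds guard only makes it total; A's sentinel keeps it in range)
def pvInnerA (cs : List Char) (i : Nat) : Nat :=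
  if i < cs.length ∧ cs.getD i ' ' = 'D' then pvInnerA cs (i + 1) else i
termination_by cs.length - i
decreasing_by omega

-- characterisation of the inner while loop (needed by outer loop's termination, so it stays above)
theorem pvInnerA_eq (cs : List Char) (i : Nat) :
    pvInnerA cs i = i + ((cs.drop i).takeWhile (· = 'D')).length := by
  rw [pvInnerA]
  split
  · rename_i h
    rw [pvInnerA_eq cs (i + 1)]
    have hd : cs.drop i = cs[i] :: cs.drop (i + 1) := List.drop_eq_getElem_cons h.1
    have hc : cs[i] = 'D' := by
      have := h.2; rwa [List.getD_eq_getElem cs ' ' h.1] at this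
    rw [hd, hc]
    simp [List.takeWhile]
    omega
  · rename_i h
    by_cases hi : i < cs.length
    · have hc : cs[i] ≠ 'D' := by
        intro hc; exact h ⟨hi, by rw [List.getD_eq_getElem cs ' ' hi]; exact hc⟩
      rw [List.drop_eq_getElem_cons hi]
      simp [List.takeWhile, hc]
    · rw [List.drop_eq_nil_of_le (by omega)]
      simp
termination_by cs.length - i
decreasing_by omega

theorem pvInnerA_gt (cs : List Char) (i : Nat) (hi : i < cs.length)
    (hc : cs.getD i ' ' = 'D') : i + 1 ≤ pvInnerA cs i := by
  rw [pvInnerA_eq]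
  have hd : cs.drop i = cs[i] :: cs.drop (i + 1) := List.drop_eq_getElem_cons hi
  have hc' : cs[i] = 'D' := by rwa [List.getD_eq_getElem cs ' ' hi] at hc
  rw [hd, hc']
  simp [List.takeWhile]

-- outer `while i < len(s)` of A, with state (i, start, res)
def pvOuterA (cs : List Char) (i start : Nat) (res : List (Int × Int)) : List (Int × Int) :=
  if hi : i < cs.length then
    if cs.getD i ' ' ≠ 'D' then
      pvOuterA cs (i + 1) start res
    else
      -- second `if s[i] == 'D'` of A: its condition holds here, so its body runs
      let start' := i
      let j := pvInnerA cs i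
      pvOuterA cs j start' (res ++ [((start' : Int), (j : Int) - 1)])
  else res
termination_by cs.length - i
decreasing_by
  · omega
  · rename_i hD
    have := pvInnerA_gt cs i hi (by simpa using hD)
    omega

def find_index_consecutive_Ds (s : String) : List (Int × Int) :=
  pvOuterA (s.toList ++ ['Z']) 0 0 []

-- ===== PORT B =====
-- port of re.finditer('D+', s): scan for each maximal run of 'D', emit (start, end-1)
def pvRuns (cs : List Char) (pos : Int) : List (Int × Int) :=
  match cs with
  | [] => []
  | c :: rest =>
    if c = 'D' then
      let k := (rest.takeWhile (· = 'D')).length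
      (pos, pos + k) :: pvRuns (rest.drop k) (pos + k + 1)
    else
      pvRuns rest (pos + 1)
termination_by cs.length
decreasing_by
  · have : (rest.takeWhile (· = 'D')).length ≤ rest.length :=
      (List.takeWhile_prefix _).length_le
    simp only [List.length_drop, List.length_cons]
    omega
  · simp

def find_index_consecutive_Ds_alt (s : String) : List (Int × Int) :=
  pvRuns s.toList 0

-- ===== PRECONDITION & SPEC =====
def Spec_find_index_consecutive_Ds (s : String) (out : List (Int × Int)) : Prop := out = find_index_consecutive_Ds_alt s
instance (s : String) (out : List (Int × Int)) : Decidable (Spec_find_index_consecutive_Ds s out) := by unfold Spec_find_index_consecutive_Ds; infer_instance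

-- ===== CLAIM (what is proved, stated in full; the proofs are below) =====
def Claim_equal_find_index_consecutive_Ds : Prop := ∀ (s : String), Dom_find_index_consecutive_Ds s → Spec_find_index_consecutive_Ds s (find_index_consecutive_Ds s)

-- ===== LEMMAS AND PROOFS =====

theorem takeWhile_append_singleton (p : Char → Bool) (x : List Char) (c : Char)
    (hc : p c = false) : ((x ++ [c]).takeWhile p) = x.takeWhile p := by
  induction x with
  | nil => simp [List.takeWhile, hc]
  | cons a l ih =>
    simp only [List.cons_append, List.takeWhile]
    cases p a <;> simp [ih]

theorem pvMain (t : List Char) (i start : Nat) (res : List (Int × Int)) (hi : i ≤ t.length) :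
    pvOuterA (t ++ ['Z']) i start res = res ++ pvRuns (t.drop i) (i : Int) := by
  have hlen : (t ++ ['Z']).length = t.length + 1 := by simp
  rcases Nat.lt_or_ge i t.length with hlt | hge
  · -- i < t.length
    have hget : (t ++ ['Z']).getD i ' ' = t[i] := by
      rw [List.getD_eq_getElem _ ' ' (by omega)]
      exact List.getElem_append_left hlt
    have hd : t.drop i = t[i] :: t.drop (i + 1) := List.drop_eq_getElem_cons hlt
    by_cases hD : t[i] = 'D'
    · -- run starting at i
      rw [pvOuterA]
      rw [dif_pos (by omega)]
      rw [if_neg (by rw [hget, hD]; simp)]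
      have hdrop : (t ++ ['Z']).drop i = t.drop i ++ ['Z'] :=
        List.drop_append_of_le_length (by omega)
      have htw : (((t ++ ['Z']).drop i).takeWhile (· = 'D')) = (t.drop i).takeWhile (· = 'D') := by
        rw [hdrop]; exact takeWhile_append_singleton _ _ _ (by decide)
      set k := ((t.drop (i + 1)).takeWhile (· = 'D')).length with hk
      have hj : pvInnerA (t ++ ['Z']) i = i + 1 + k := by
        rw [pvInnerA_eq, htw, hd]
        simp [List.takeWhile, hD, hk]
        omega
      have hkle : k ≤ t.length - (i + 1) := by
        have h1 : ((t.drop (i + 1)).takeWhile (· = 'D')).length ≤ (t.drop (i + 1)).length :=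
          (List.takeWhile_prefix _).length_le
        simpa using h1
      simp only [hj]
      rw [pvMain t (i + 1 + k) i _ (by omega)]
      rw [hd, pvRuns]
      rw [if_pos (by simp [hD])]
      simp only [List.drop_drop]
      rw [← hk]
      have c1 : ((i + 1 + k : Nat) : Int) - 1 = (i : Int) + (k : Int) := by push_cast; ring
      have c2 : ((i + 1 + k : Nat) : Int) = (i : Int) + (k : Int) + 1 := by push_cast; ring
      have c3 : i + 1 + (List.takeWhile (fun x => decide (x = 'D')) (List.drop (i + 1) t)).length
          = i + 1 + k := by omega
      rw [c3, c1, c2]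
      simp
    · -- no run at i
      rw [pvOuterA]
      rw [dif_pos (by omega)]
      rw [if_pos (by rw [hget]; simpa using hD)]
      rw [pvMain t (i + 1) start res (by omega)]
      rw [hd, pvRuns, if_neg (by simpa using hD)]
      push_cast
      ring_nf
  · -- i = t.length: the sentinel position, then the loop ends
    have hieq : i = t.length := by omega
    rw [pvOuterA]
    rw [dif_pos (by omega)]
    subst hieq
    have hget : (t ++ ['Z']).getD t.length ' ' = 'Z' := by
      rw [List.getD_eq_getElem _ ' ' (by omega)]
      simp
    rw [if_pos (by rw [hget]; decide)]
    rw [pvOuterA]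
    rw [dif_neg (by omega)]
    rw [List.drop_eq_nil_of_le (by omega)]
    simp [pvRuns]
termination_by t.length - i
decreasing_by
  all_goals omega

-- ===== VERDICT (by name: the statement is the Claim_ definition above) =====
theorem find_index_consecutive_Ds_spec : Claim_equal_find_index_consecutive_Ds := by
  intro s _
  unfold Spec_find_index_consecutive_Ds find_index_consecutive_Ds find_index_consecutive_Ds_alt
  rw [pvMain s.toList 0 0 [] (by omega)]
  simp
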